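-- pv_equiv track=rewrite | github.com/r-rathi/advent-of-code | 2023/day13/v1.py | partx
-- ===== SOURCE A (Python) =====
-- TBL = str.maketrans({".": "0", "#": "1"})
--
-- def find_mirror(pattern: list[str], smudges: int) -> int:
--     # Converting pattern to numbers, e.g. "#.#" -> 0b101, allows a quick count
--     # of positions that differ, a.k.a hamming-distance
--     numbers = [int(p.translate(TBL), 2) for p in pattern]
--
--     for i in range(1, len(numbers)):
--         # split between (i-1, i), reflect, and count mismatches
--         fwd = numbers[i:]
--         rev = reversed(numbers[:i])
--         dist = sum((f ^ r).bit_count() for f, r in zip(fwd, rev))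
--         if dist == smudges:
--             return i
--
--     return 0
--
-- def partx(patterns, smudges=0):
--     total = 0
--     for pattern in patterns:
--         # row wise
--         nr = find_mirror(pattern, smudges)
--
--         # column wise
--         pattern_t = ["".join(r) for r in zip(*pattern)]
--         nc = find_mirror(pattern_t, smudges)
--
--         total += 100 * nr + nc
--
--     return total
-- ===== SOURCE B (Python) =====
-- def partx(patterns, smudges=0):
--     # One pass over all unordered row pairs / column pairs, accumulating the
--     # character-mismatch count of each pair into an anti-diagonal bucket (index
--     # a+b); a reflection line between i-1 and i pairs exactly the rows with
--     # index sum 2*i-1, so the answer is the first i whose bucket holds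
--     # `smudges`. No per-split reflect/zip, no bit encoding, no transpose.
--     total = 0
--     for p in patterns:
--         n = len(p)
--         w = len(p[0]) if p else 0
--         rbuck = [0] * (2 * n)
--         for a in range(n):
--             for b in range(a + 1, n):
--                 rbuck[a + b] += sum(x != y for x, y in zip(p[a], p[b]))
--         cbuck = [0] * (2 * w)
--         for a in range(w):
--             for b in range(a + 1, w):
--                 cbuck[a + b] += sum(row[a] != row[b] for row in p)
--         nr = next((i for i in range(1, n) if rbuck[2 * i - 1] == smudges), 0)
--         nc = next((i for i in range(1, w) if cbuck[2 * i - 1] == smudges), 0)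
--         total += 100 * nr + nc
--     return total
-- ===== Notes on version B (the rewrite author's own statement) =====
-- stated objective: alternative
-- what changed: B makes one pass over all unordered row pairs (and column pairs, without transposing) accumulating character-mismatch counts into anti-diagonal buckets indexed by a+b, then scans the buckets for the first split i with bucket[2i-1]==smudges, instead of A's per-split reflect/zip of bit-encoded rows with xor/bit_count.
-- outside the precondition, e.g. on partx([['0', '.']], 0): A returns 100, B returns 0; on partx([['#', '##']], 1): A returns 100, B returns 0
import Mathlib
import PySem

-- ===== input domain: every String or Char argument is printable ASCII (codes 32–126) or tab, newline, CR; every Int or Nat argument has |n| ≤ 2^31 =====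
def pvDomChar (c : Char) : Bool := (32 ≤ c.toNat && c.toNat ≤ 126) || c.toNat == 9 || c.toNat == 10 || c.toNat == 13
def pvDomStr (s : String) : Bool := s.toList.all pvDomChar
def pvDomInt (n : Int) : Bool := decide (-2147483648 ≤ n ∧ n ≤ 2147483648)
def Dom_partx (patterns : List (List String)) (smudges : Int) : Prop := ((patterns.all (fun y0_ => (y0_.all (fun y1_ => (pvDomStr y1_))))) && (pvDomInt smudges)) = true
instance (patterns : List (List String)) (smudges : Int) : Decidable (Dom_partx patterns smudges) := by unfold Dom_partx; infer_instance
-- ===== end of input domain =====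

-- B replaces A's per-split reflect/zip of bit-encoded rows by one pass over all
-- unordered row/column pairs accumulating mismatch counts into anti-diagonal
-- buckets (index a+b), then a scan of the buckets; columns are handled without
-- transposing (objective: alternative).

-- ===== PORT A =====

-- p.translate(TBL): '.'->'0', '#'->'1', everything else unchanged
def pvTranslateTBL (s : List Char) : List Char :=
  s.map (fun c => if c = '.' then '0' else if c = '#' then '1' else c)

-- int(x, 2): exact for the strings Pre_ admits (a nonempty run of binary digits,
-- which is what translate produces from a '.'/'#' row); none = Python ValueError.
def pvParseBin? (s : List Char) : Option Nat :=
  if s = [] then none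
  else s.foldl (fun acc c =>
    match acc with
    | none => none
    | some v => if c = '0' then some (2 * v) else if c = '1' then some (2 * v + 1) else none)
    (some 0)

-- int.bit_count (argument here is always a xor of nonnegatives)
def pvBitCount : Nat → Nat
  | 0 => 0
  | n + 1 => pvBitCount ((n + 1) / 2) + (n + 1) % 2
decreasing_by omega

-- numbers = [int(p.translate(TBL), 2) for p in pattern]
def pvNumbers? (pattern : List String) : Option (List Nat) :=
  pattern.foldr
    (fun s acc =>
      match pvParseBin? (pvTranslateTBL s.toList), acc with
      | some n, some l => some (n :: l)
      | _, _ => none)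
    (some [])

-- dist = sum((f ^ r).bit_count() for f, r in zip(numbers[i:], reversed(numbers[:i])))
def pvDistA (numbers : List Nat) (i : Nat) : Nat :=
  ((numbers.drop i).zip (numbers.take i).reverse).foldl
    (fun acc fr => acc + pvBitCount (Nat.xor fr.1 fr.2)) 0

-- the `for i in range(1, len(numbers))` loop with its early return
def pvFmGoA (numbers : List Nat) (smudges : Int) : List Int → Int
  | [] => 0
  | i :: rest =>
      if (pvDistA numbers i.toNat : Int) = smudges then i else pvFmGoA numbers smudges rest

-- find_mirror; none = a row raised ValueError in int()
def pvFindMirrorA (pattern : List String) (smudges : Int) : Option Int :=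
  match pvNumbers? pattern with
  | none => none
  | some numbers => some (pvFmGoA numbers smudges (PySem.List.pyRange 1 numbers.length 1))

-- zip(*pattern): truncates every row to the shortest length
def pvMinLen : List (List Char) → Nat
  | [] => 0
  | r :: rs => rs.foldl (fun m x => min m x.length) r.length

def pvTransposeZip (rows : List (List Char)) : List (List Char) :=
  (List.range (pvMinLen rows)).map (fun j => rows.map (fun r => r.getD j ' '))

def partx (patterns : List (List String)) (smudges : Int) : Int :=
  patterns.foldl
    (fun total pattern =>
      -- `.getD 0` only fires where Python raises (outside Pre_)
      let nr := (pvFindMirrorA pattern smudges).getD 0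
      let pattern_t := (pvTransposeZip (pattern.map String.toList)).map (fun cs => String.ofList cs)
      let nc := (pvFindMirrorA pattern_t smudges).getD 0
      total + 100 * nr + nc)
    0

-- ===== PORT B =====

-- sum(x != y for x, y in zip(p[a], p[b]))
def pvRowDistB (a b : String) : Nat :=
  (a.toList.zip b.toList).foldl (fun acc xy => acc + (if xy.1 ≠ xy.2 then 1 else 0)) 0

-- sum(row[a] != row[b] for row in p); row[a]/row[b] indexing is exact inside
-- Pre_ (rectangular pattern, a and b below the width)
def pvColDistB (p : List String) (a b : Nat) : Nat :=
  p.foldl (fun acc r =>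
    acc + (if r.toList.getD a ' ' ≠ r.toList.getD b ' ' then 1 else 0)) 0

-- buck = [0]*(2*n); for a in range(n): for b in range(a+1, n): buck[a+b] += d(a, b)
-- (the a+b index is always < 2*n, so List.set is Python's in-place assignment)
def pvBuckB (n : Nat) (d : Nat → Nat → Nat) : List Nat :=
  (List.range n).foldl
    (fun bk a =>
      (List.range' (a + 1) (n - a - 1)).foldl
        (fun bk b => bk.set (a + b) (bk.getD (a + b) 0 + d a b)) bk)
    (List.replicate (2 * n) 0)

-- next((i for i in range(1, n) if buck[2*i-1] == smudges), 0)
def pvScanB (bk : List Nat) (smudges : Int) : List Nat → Int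
  | [] => 0
  | i :: rest =>
      if (bk.getD (2 * i - 1) 0 : Int) = smudges then (i : Int) else pvScanB bk smudges rest

def partx_alt (patterns : List (List String)) (smudges : Int) : Int :=
  patterns.foldl
    (fun total p =>
      let n := p.length
      let w := (p.headD "").toList.length   -- len(p[0]) if p else 0
      let rbuck := pvBuckB n (fun a b => pvRowDistB (p.getD a "") (p.getD b ""))
      let cbuck := pvBuckB w (pvColDistB p)
      let nr := pvScanB rbuck smudges (List.range' 1 (n - 1))
      let nc := pvScanB cbuck smudges (List.range' 1 (w - 1))
      total + 100 * nr + nc)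
    0

-- ===== PRECONDITION & SPEC =====

def pvGoodRowB (s : String) : Bool :=
  !s.toList.isEmpty && s.toList.all (fun c => c == '.' || c == '#' || c == '0' || c == '1')

def pvGoodPatB (p : List String) : Bool :=
  p.all pvGoodRowB && p.all (fun s => s.toList.length == (p.headD "").toList.length) &&
    !(p.any (fun s => s.toList.contains '.') && p.any (fun s => s.toList.contains '0')) &&
    !(p.any (fun s => s.toList.contains '#') && p.any (fun s => s.toList.contains '1'))

-- Pre_ admits rectangular grids of nonempty rows over '.', '#', '0', '1' in which no pattern
-- mixes '.' with '0' or '#' with '1'. It excludes (a) rows with other characters — there some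
-- row or column makes int(x,2) raise ValueError — and (b) two corners where A still returns a
-- value that is an accident of its numeric encoding: grids mixing '.' with '0' (or '#' with
-- '1'), which A's translation conflates, and ragged patterns, which A silently right-aligns.
def Pre_partx (patterns : List (List String)) (smudges : Int) : Prop :=
  ∀ p ∈ patterns, pvGoodPatB p = true

instance (patterns : List (List String)) (smudges : Int) : Decidable (Pre_partx patterns smudges) := by
  unfold Pre_partx; infer_instance

def pvWitness_partx : List (List String) × Int :=
  ([[".#", ".#"]], 0)

def Spec_partx (patterns : List (List String)) (smudges : Int) (out : Int) : Prop := out = partx_alt patterns smudges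
instance (patterns : List (List String)) (smudges : Int) (out : Int) : Decidable (Spec_partx patterns smudges out) := by unfold Spec_partx; infer_instance

-- ===== CLAIM (what is proved, stated in full; the proofs are below) =====
def Claim_equal_partx : Prop := ∀ (patterns : List (List String)) (smudges : Int), Dom_partx patterns smudges → Pre_partx patterns smudges → Spec_partx patterns smudges (partx patterns smudges)

-- ===== LEMMAS AND PROOFS =====

def pvGoodRow (s : String) : Prop :=
  s.toList ≠ [] ∧ s.toList.all (fun c => c == '.' || c == '#' || c == '0' || c == '1') = true

def pvGoodPat (p : List String) : Prop :=
  (∀ s ∈ p, pvGoodRow s) ∧ (∀ s ∈ p, s.toList.length = (p.headD "").toList.length) ∧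
    ¬(p.any (fun s => s.toList.contains '.') = true ∧ p.any (fun s => s.toList.contains '0') = true) ∧
    ¬(p.any (fun s => s.toList.contains '#') = true ∧ p.any (fun s => s.toList.contains '1') = true)

theorem pvGoodPat_of_B (p : List String) (h : pvGoodPatB p = true) : pvGoodPat p := by
  unfold pvGoodPatB at h
  simp only [Bool.and_eq_true, Bool.not_eq_true', Bool.and_eq_false_iff] at h
  obtain ⟨⟨⟨hrows, hlens⟩, hcl1⟩, hcl2⟩ := h
  refine ⟨?_, ?_, ?_, ?_⟩
  · intro s hs
    have hr := List.all_eq_true.mp hrows s hs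
    unfold pvGoodRowB at hr
    simp only [Bool.and_eq_true] at hr
    exact ⟨by simpa using hr.1, hr.2⟩
  · intro s hs
    have := List.all_eq_true.mp hlens s hs
    simpa using this
  · rintro ⟨h1, h2⟩
    rcases hcl1 with h | h
    · obtain ⟨x, hx, hx'⟩ := List.any_eq_true.mp h1
      have hfx := List.any_eq_false.mp h x hx
      simp_all
    · obtain ⟨x, hx, hx'⟩ := List.any_eq_true.mp h2
      have hfx := List.any_eq_false.mp h x hx
      simp_all
  · rintro ⟨h1, h2⟩
    rcases hcl2 with h | h
    · obtain ⟨x, hx, hx'⟩ := List.any_eq_true.mp h1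
      have hfx := List.any_eq_false.mp h x hx
      simp_all
    · obtain ⟨x, hx, hx'⟩ := List.any_eq_true.mp h2
      have hfx := List.any_eq_false.mp h x hx
      simp_all

theorem pvGoodRow_chars (s : String) (h : pvGoodRow s) :
    ∀ c ∈ s.toList, c = '.' ∨ c = '#' ∨ c = '0' ∨ c = '1' := by
  intro c hc
  have := List.all_eq_true.mp h.2 c hc
  simpa [or_assoc] using this

-- the bit a grid character denotes after A's translation
def pvBitc (c : Char) : Nat := if c = '#' ∨ c = '1' then 1 else 0

-- value of a '.'/'#' row, the proof-side characterisation of A's int(translate(row), 2)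
def pvValC (l : List Char) : Nat :=
  l.foldl (fun v c => 2 * v + pvBitc c) 0

theorem pvParseBin_go (l : List Char) (v : Nat)
    (h : ∀ c ∈ l, c = '.' ∨ c = '#' ∨ c = '0' ∨ c = '1') :
    (pvTranslateTBL l).foldl
      (fun acc c =>
        match acc with
        | none => none
        | some v => if c = '0' then some (2 * v) else if c = '1' then some (2 * v + 1) else none)
      (some v)
    = some (l.foldl (fun v c => 2 * v + pvBitc c) v) := by
  induction l generalizing v with
  | nil => rfl
  | cons c l ih =>
      have hc := h c (List.mem_cons_self ..)
      have hl : ∀ x ∈ l, x = '.' ∨ x = '#' ∨ x = '0' ∨ x = '1' :=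
        fun x hx => h x (List.mem_cons_of_mem _ hx)
      rcases hc with hc | hc | hc | hc <;> subst hc <;>
        simp [pvTranslateTBL, pvBitc] at ih ⊢ <;> rw [ih _ hl]

theorem pvParseBin_good (s : String) (h : pvGoodRow s) :
    pvParseBin? (pvTranslateTBL s.toList) = some (pvValC s.toList) := by
  obtain ⟨hne, hch⟩ := h
  unfold pvParseBin?
  rw [if_neg (by simpa [pvTranslateTBL] using hne)]
  exact pvParseBin_go s.toList 0 (pvGoodRow_chars s ⟨hne, hch⟩)

theorem pvNumbers_good (p : List String) (h : ∀ s ∈ p, pvGoodRow s) :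
    pvNumbers? p = some (p.map (fun s => pvValC s.toList)) := by
  induction p with
  | nil => rfl
  | cons s p ih =>
      have hs := h s (List.mem_cons_self ..)
      have hp : ∀ x ∈ p, pvGoodRow x := fun x hx => h x (List.mem_cons_of_mem _ hx)
      simp only [pvNumbers?, List.foldr_cons, List.map_cons]
      rw [show p.foldr _ (some []) = pvNumbers? p from rfl, ih hp, pvParseBin_good s hs]

theorem pvBitCount_zero : pvBitCount 0 = 0 := by
  rw [pvBitCount]

theorem pvBitCount_eq (n : Nat) (hn : 0 < n) : pvBitCount n = pvBitCount (n / 2) + n % 2 := by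
  obtain ⟨m, rfl⟩ := Nat.exists_eq_add_of_lt hn
  simp [pvBitCount]

theorem pvBitCount_two_add (a b : Nat) (hb : b < 2) :
    pvBitCount (2 * a + b) = pvBitCount a + b := by
  rcases Nat.eq_zero_or_pos (2 * a + b) with h0 | hpos
  · have ha : a = 0 := by omega
    have hb0 : b = 0 := by omega
    simp [ha, hb0, pvBitCount]
  · rw [pvBitCount_eq _ hpos, show (2 * a + b) / 2 = a by omega, show (2 * a + b) % 2 = b by omega]

theorem pvXorBit (v w : Nat) (b d : Bool) :
    Nat.xor (2 * v + b.toNat) (2 * w + d.toNat) = 2 * Nat.xor v w + (bne b d).toNat := by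
  rw [← Nat.bit_val, ← Nat.bit_val, ← Nat.bit_val]
  exact Nat.xor_bit b v d w

theorem pvStep (v w b d : Nat) (hb : b < 2) (hd : d < 2) :
    pvBitCount (Nat.xor (2 * v + b) (2 * w + d))
      = pvBitCount (Nat.xor v w) + (if b = d then 0 else 1) := by
  have hb' : b = 0 ∨ b = 1 := by omega
  have hd' : d = 0 ∨ d = 1 := by omega
  rcases hb' with rfl | rfl <;> rcases hd' with rfl | rfl
  · have h := pvXorBit v w false false
    simp only [Bool.toNat_false, bne_self_eq_false] at h
    rw [h, pvBitCount_two_add _ _ (by omega)]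
    simp
  · have h := pvXorBit v w false true
    simp only [Bool.toNat_false, Bool.toNat_true] at h
    rw [h, pvBitCount_two_add _ _ (by norm_num [Bool.toNat]), if_neg (by omega)]
    norm_num [Bool.toNat]
  · have h := pvXorBit v w true false
    simp only [Bool.toNat_false, Bool.toNat_true] at h
    rw [h, pvBitCount_two_add _ _ (by norm_num [Bool.toNat]), if_neg (by omega)]
    norm_num [Bool.toNat]
  · have h := pvXorBit v w true true
    simp only [Bool.toNat_true, bne_self_eq_false] at h
    rw [h, pvBitCount_two_add _ _ (by norm_num [Bool.toNat])]
    norm_num [Bool.toNat]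

theorem pvValC_append (l : List Char) (c : Char) :
    pvValC (l ++ [c]) = 2 * pvValC l + pvBitc c := by
  simp [pvValC, List.foldl_append]

-- the Hamming lemma: bit_count of xor of the two row numbers = character mismatch count,
-- provided distinct characters of the two rows never denote the same bit
theorem pvHamming (a b : List Char) (hlen : a.length = b.length)
    (hinj : ∀ c ∈ a, ∀ d ∈ b, c ≠ d → pvBitc c ≠ pvBitc d) :
    pvBitCount (Nat.xor (pvValC a) (pvValC b))
      = (a.zip b).foldl (fun acc xy => acc + (if xy.1 ≠ xy.2 then 1 else 0)) 0 := by
  induction a using List.reverseRecOn generalizing b with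
  | nil =>
      have hbnil : b = [] := List.length_eq_zero_iff.mp hlen.symm
      subst hbnil
      show pvBitCount (Nat.xor (pvValC []) (pvValC [])) = 0
      rw [show pvValC [] = 0 from rfl, show Nat.xor 0 0 = 0 from rfl, pvBitCount_zero]
  | append_singleton as c ih =>
      rcases List.eq_nil_or_concat b with rfl | ⟨bs, d, rfl⟩
      · simp at hlen
      · simp only [List.concat_eq_append] at hlen hinj ⊢
        have hlen' : as.length = bs.length := by simpa using hlen
        have hinj' : ∀ x ∈ as, ∀ y ∈ bs, x ≠ y → pvBitc x ≠ pvBitc y :=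
          fun x hx y hy => hinj x (by simp [hx]) y (by simp [hy])
        have hcd := hinj c (by simp) d (by simp)
        rw [pvValC_append, pvValC_append,
          pvStep _ _ _ _ (by unfold pvBitc; split <;> omega) (by unfold pvBitc; split <;> omega),
          List.zip_append hlen', List.foldl_append, ih bs hlen' hinj']
        have hbit : (if pvBitc c = pvBitc d then (0 : Nat) else 1) = (if c ≠ d then 1 else 0) := by
          by_cases hne : c = d
          · subst hne; simp
          · rw [if_neg (hcd hne), if_pos hne]
        rw [hbit]
        simp

-- distinct characters of a clash-free pattern never denote the same bit
theorem pvPat_inj (p : List String) (h : pvGoodPat p) :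
    ∀ s1 ∈ p, ∀ s2 ∈ p, ∀ c ∈ s1.toList, ∀ d ∈ s2.toList, c ≠ d → pvBitc c ≠ pvBitc d := by
  obtain ⟨hrows, -, hc1, hc2⟩ := h
  intro s1 hs1 s2 hs2 c hc d hd hne hbit
  have hcm := pvGoodRow_chars s1 (hrows s1 hs1) c hc
  have hdm := pvGoodRow_chars s2 (hrows s2 hs2) d hd
  have hmc : ∀ (x : Char) (s : String), s ∈ p → x ∈ s.toList →
      p.any (fun s => s.toList.contains x) = true := by
    intro x s hs hx
    exact List.any_eq_true.mpr ⟨s, hs, by simpa using hx⟩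
  rcases hcm with rfl | rfl | rfl | rfl <;> rcases hdm with rfl | rfl | rfl | rfl <;>
    first
      | exact hne rfl
      | exact hc1 ⟨hmc '.' _ hs1 hc, hmc '0' _ hs2 hd⟩
      | exact hc1 ⟨hmc '.' _ hs2 hd, hmc '0' _ hs1 hc⟩
      | exact hc2 ⟨hmc '#' _ hs1 hc, hmc '1' _ hs2 hd⟩
      | exact hc2 ⟨hmc '#' _ hs2 hd, hmc '1' _ hs1 hc⟩
      | simp [pvBitc] at hbit

-- fold-to-sum bridge
theorem pvFoldlAddNat {α : Type} (f : α → Nat) (l : List α) (a : Nat) :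
    l.foldl (fun acc x => acc + f x) a = a + (l.map f).sum := by
  induction l generalizing a with
  | nil => simp
  | cons x l ih => simp [ih, Nat.add_assoc]

-- list-range sum = Finset-range sum
theorem pvSumMapRange (f : Nat → Nat) (n : Nat) :
    ((List.range n).map f).sum = ∑ k ∈ Finset.range n, f k := by
  induction n with
  | zero => simp
  | succ n ih => simp [List.range_succ, Finset.sum_range_succ, ih]

theorem pvFoldlMin_const (L : Nat) :
    ∀ (rs : List (List Char)) (m : Nat), (∀ x ∈ rs, x.length = L) → m = L →
      rs.foldl (fun m x => min m x.length) m = L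
  | [], m, _, h0 => by simpa using h0
  | x :: rs, m, hm, h0 => by
      simp only [List.foldl_cons]
      exact pvFoldlMin_const L rs _ (fun y hy => hm y (List.mem_cons_of_mem _ hy))
        (by rw [h0, hm x (List.mem_cons_self ..)]; simp)

theorem pvMinLen_const (rows : List (List Char)) (L : Nat)
    (h : ∀ r ∈ rows, r.length = L) (hne : rows ≠ []) : pvMinLen rows = L := by
  match rows, hne with
  | r :: rs, _ =>
      exact pvFoldlMin_const L rs r.length
        (fun y hy => h y (List.mem_cons_of_mem _ hy)) (h r (List.mem_cons_self ..))

-- a good pattern transposes to a good pattern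
theorem pvTranspose_good (p : List String) (h : pvGoodPat p) :
    pvGoodPat ((pvTransposeZip (p.map String.toList)).map (fun cs => String.ofList cs)) := by
  obtain ⟨hrows, hlen, hcl1, hcl2⟩ := h
  cases p with
  | nil =>
      exact ⟨by simp [pvTransposeZip, pvMinLen], by simp [pvTransposeZip, pvMinLen],
        by simp [pvTransposeZip, pvMinLen], by simp [pvTransposeZip, pvMinLen]⟩
  | cons q t =>
      have hlen' : ∀ s ∈ q :: t, s.toList.length = q.toList.length := by
        intro s hs; simpa using hlen s hs
      have hml : pvMinLen ((q :: t).map String.toList) = q.toList.length := by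
        apply pvMinLen_const
        · intro r hr
          obtain ⟨s, hs, rfl⟩ := List.mem_map.mp hr
          exact hlen' s hs
        · simp
      have hsub : ∀ x : Char,
          ((pvTransposeZip ((q :: t).map String.toList)).map
            (fun cs => String.ofList cs)).any (fun s => s.toList.contains x) = true →
          (q :: t).any (fun s => s.toList.contains x) = true := by
        intro x hx
        obtain ⟨s, hs, hxs⟩ := List.any_eq_true.mp hx
        obtain ⟨cs, hcs, rfl⟩ := List.mem_map.mp hs
        unfold pvTransposeZip at hcs
        obtain ⟨j, hj, rfl⟩ := List.mem_map.mp hcs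
        simp only [String.toList_ofList] at hxs
        have hxm : x ∈ ((q :: t).map String.toList).map (fun r => r.getD j ' ') := by
          simpa using hxs
        obtain ⟨r, hr, hrx⟩ := List.mem_map.mp hxm
        obtain ⟨w, hwp, rfl⟩ := List.mem_map.mp hr
        refine List.any_eq_true.mpr ⟨w, hwp, ?_⟩
        have hjw : j < w.toList.length := by
          rw [hlen' w hwp]; rw [hml] at hj; simpa using hj
        rw [List.getD_eq_getElem _ _ hjw] at hrx
        simpa [← hrx] using List.getElem_mem hjw
      refine ⟨?_, ?_, ?_, ?_⟩
      · intro s hs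
        obtain ⟨cs, hcs, rfl⟩ := List.mem_map.mp hs
        unfold pvTransposeZip at hcs
        obtain ⟨j, hj, rfl⟩ := List.mem_map.mp hcs
        have hjL : j < q.toList.length := by rw [hml] at hj; simpa using hj
        constructor
        · simp [String.toList_ofList]
        · simp only [String.toList_ofList]
          apply List.all_eq_true.mpr
          intro c hc
          obtain ⟨r, hr, rfl⟩ := List.mem_map.mp hc
          obtain ⟨w, hwp, rfl⟩ := List.mem_map.mp hr
          have hjlen : j < w.toList.length := by rw [hlen' w hwp]; exact hjL
          rw [List.getD_eq_getElem _ _ hjlen]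
          rcases pvGoodRow_chars w (hrows w hwp) (w.toList[j]'hjlen) (List.getElem_mem hjlen)
            with hcc | hcc | hcc | hcc <;> simp [hcc]
      · intro s hs
        obtain ⟨cs, hcs, rfl⟩ := List.mem_map.mp hs
        unfold pvTransposeZip at hcs
        obtain ⟨j, hj, rfl⟩ := List.mem_map.mp hcs
        simp only [String.toList_ofList, List.length_map]
        have hLpos : 0 < q.toList.length := by
          have h1 := (hrows q (List.mem_cons_self ..)).1
          rcases Nat.eq_zero_or_pos q.toList.length with h0 | h1'
          · exact absurd (List.length_eq_zero_iff.mp h0) h1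
          · exact h1'
        have hhead : ((pvTransposeZip ((q :: t).map String.toList)).map (fun cs => String.ofList cs)).headD "" =
            String.ofList (((q :: t).map String.toList).map (fun r => r.getD 0 ' ')) := by
          unfold pvTransposeZip
          rw [hml]
          rcases Nat.exists_eq_add_of_lt hLpos with ⟨m, hm⟩
          rw [show q.toList.length = m + 1 by omega, List.range_succ_eq_map]
          simp
        rw [hhead]
        simp
      · rintro ⟨h1, h2⟩
        exact hcl1 ⟨hsub '.' h1, hsub '0' h2⟩
      · rintro ⟨h1, h2⟩
        exact hcl2 ⟨hsub '#' h1, hsub '1' h2⟩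

-- numbers[j] for j < n
theorem pvNumbers_getD (p : List String) (j : Nat) (hj : j < p.length) :
    (p.map (fun s => pvValC s.toList)).getD j 0 = pvValC (p.getD j "").toList := by
  rw [List.getD_eq_getElem _ _ (by simpa using hj), List.getD_eq_getElem _ _ hj]
  simp

-- the mirrored-pair mismatch sum at split i, with an abstract pair distance d
def pvMirror (d : Nat → Nat → Nat) (n i : Nat) : Nat :=
  ∑ k ∈ Finset.range (min i (n - i)), d (i - 1 - k) (i + k)

-- dist_A at split i equals the mirrored-pair sum, on a good pattern
theorem pvDist_eq (p : List String) (i : Nat) (hi1 : 1 ≤ i) (hi2 : i < p.length)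
    (h : pvGoodPat p) :
    pvDistA (p.map (fun s => pvValC s.toList)) i
      = pvMirror (fun a b => pvRowDistB (p.getD a "") (p.getD b "")) p.length i := by
  obtain ⟨hrows, hlen, -, -⟩ := id h
  set nums := p.map (fun s => pvValC s.toList) with hnums
  set n := p.length with hn
  have hnl : nums.length = n := by simp [hnums, hn]
  set m := min i (n - i) with hm
  unfold pvDistA pvMirror
  rw [pvFoldlAddNat]
  simp only [Nat.zero_add]
  have hzlen : ((nums.drop i).zip (nums.take i).reverse).length = m := by
    simp [List.length_zip, hnl]; omega
  have key : ((nums.drop i).zip (nums.take i).reverse).map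
      (fun fr => pvBitCount (Nat.xor fr.1 fr.2))
      = (List.range (min i (n - i))).map
        (fun k => pvRowDistB (p.getD (i - 1 - k) "") (p.getD (i + k) "")) := by
    apply List.ext_getElem
    · simp [hzlen, hm]
    · intro k hk1 hk2
      simp only [List.length_map, hzlen, ← hm] at hk1
      have hklt : k < m := hk1
      have hk_i : k < i := by omega
      have hk_ni : i + k < n := by omega
      simp only [List.getElem_map, List.getElem_range, List.getElem_zip]
      have hfwd : (nums.drop i)[k]'(by simp [hnl]; omega) = pvValC (p.getD (i + k) "").toList := by
        rw [List.getElem_drop, ← pvNumbers_getD p _ (by omega)]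
        rw [List.getD_eq_getElem _ _ (by simp [hnums]; omega)]
      have hrev : (nums.take i).reverse[k]'(by simp [hnl]; omega)
          = pvValC (p.getD (i - 1 - k) "").toList := by
        rw [List.getElem_reverse, List.getElem_take, ← pvNumbers_getD p _ (by omega)]
        rw [List.getD_eq_getElem _ _ (by simp [hnums, hnl]; omega)]
        congr 1
        simp [hnl]
        omega
      rw [hfwd, hrev]
      have hmem1 : p.getD (i + k) "" ∈ p := by
        rw [List.getD_eq_getElem _ _ (by omega)]; exact List.getElem_mem _
      have hmem2 : p.getD (i - 1 - k) "" ∈ p := by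
        rw [List.getD_eq_getElem _ _ (by omega)]; exact List.getElem_mem _
      unfold pvRowDistB
      have hxc : ∀ x y : Nat, Nat.xor x y = Nat.xor y x := fun x y => Nat.xor_comm x y
      rw [hxc]
      apply pvHamming
      · rw [hlen _ hmem1, hlen _ hmem2]
      · exact fun c hc d hd => pvPat_inj p h _ hmem2 _ hmem1 c hc d hd
  rw [key, pvSumMapRange]

-- ---- bucket characterisation ----

-- the flat list of unordered index pairs a < b < n, in B's traversal order
def pvPairL (n : Nat) : List (Nat × Nat) :=
  (List.range n).flatMap (fun a => (List.range' (a + 1) (n - a - 1)).map (fun b => (a, b)))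

theorem pvBuck_fold (n : Nat) (d : Nat → Nat → Nat) :
    pvBuckB n d
      = (pvPairL n).foldl
          (fun bk ab => bk.set (ab.1 + ab.2) (bk.getD (ab.1 + ab.2) 0 + d ab.1 ab.2))
          (List.replicate (2 * n) 0) := by
  unfold pvBuckB pvPairL
  rw [List.foldl_flatMap]
  apply PySem.List.foldl_congr_mem
  intro bk a _
  rw [List.foldl_map]

theorem pvMemPairL (n : Nat) (ab : Nat × Nat) (h : ab ∈ pvPairL n) :
    ab.1 < ab.2 ∧ ab.2 < n := by
  unfold pvPairL at h
  obtain ⟨a, ha, hab⟩ := List.mem_flatMap.mp h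
  obtain ⟨b, hb, rfl⟩ := List.mem_map.mp hab
  have ha' : a < n := List.mem_range.mp ha
  have hb' := List.mem_range'.mp hb
  obtain ⟨k, hk, rfl⟩ := hb'
  constructor <;> simp <;> omega

-- final bucket value at any index s: initial value plus the pair distances on diagonal s
theorem pvFoldSet_getD (d : Nat → Nat → Nat) (items : List (Nat × Nat)) (bk : List Nat)
    (s : Nat) (h : ∀ ab ∈ items, ab.1 + ab.2 < bk.length) :
    (items.foldl
      (fun bk ab => bk.set (ab.1 + ab.2) (bk.getD (ab.1 + ab.2) 0 + d ab.1 ab.2)) bk).getD s 0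
    = bk.getD s 0 + ((items.filter (fun ab => ab.1 + ab.2 == s)).map (fun ab => d ab.1 ab.2)).sum := by
  induction items generalizing bk with
  | nil => simp
  | cons ab items ih =>
      have hab := h ab (List.mem_cons_self ..)
      have h' : ∀ x ∈ items, x.1 + x.2 <
          (bk.set (ab.1 + ab.2) (bk.getD (ab.1 + ab.2) 0 + d ab.1 ab.2)).length := by
        intro x hx
        simpa using h x (List.mem_cons_of_mem _ hx)
      simp only [List.foldl_cons, List.filter_cons]
      rw [ih _ h']
      by_cases hs : ab.1 + ab.2 = s
      · rw [if_pos (by simpa using hs)]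
        simp only [List.map_cons, List.sum_cons]
        have : (bk.set (ab.1 + ab.2) (bk.getD (ab.1 + ab.2) 0 + d ab.1 ab.2)).getD s 0
            = bk.getD s 0 + d ab.1 ab.2 := by
          subst hs
          simp [List.getD, List.getElem?_set, hab]
        rw [this]
        omega
      · rw [if_neg (by simpa using hs)]
        have : (bk.set (ab.1 + ab.2) (bk.getD (ab.1 + ab.2) 0 + d ab.1 ab.2)).getD s 0
            = bk.getD s 0 := by
          simp [List.getD, List.getElem?_set, hs]
        rw [this]
  termination_by items.length

-- map-of-filter as a 0/ite sum
theorem pvSumFilterMap (q : Nat × Nat → Bool) (f : Nat × Nat → Nat) (l : List (Nat × Nat)) :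
    ((l.filter q).map f).sum = (l.map (fun x => if q x then f x else 0)).sum := by
  induction l with
  | nil => rfl
  | cons x l ih =>
      by_cases hx : q x
      · simp [List.filter_cons, hx, ih]
      · simp [List.filter_cons, hx, ih]

-- the bucket at index 2i-1 holds exactly the mirrored-pair sum at split i
theorem pvBuck_getD (n : Nat) (d : Nat → Nat → Nat) (i : Nat) (h1 : 1 ≤ i) (h2 : i < n) :
    (pvBuckB n d).getD (2 * i - 1) 0 = pvMirror d n i := by
  rw [pvBuck_fold, pvFoldSet_getD _ _ _ _ (by
    intro ab hab
    have := pvMemPairL n ab hab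
    simp only [List.length_replicate]
    omega)]
  rw [List.getD_replicate _ (by omega), Nat.zero_add, pvSumFilterMap]
  -- flatten the pair list and push the sum inside
  unfold pvPairL
  rw [List.map_flatMap, List.flatMap, List.sum_flatten, List.map_map]
  have inner : ∀ a : Nat, a < n →
      (((List.range' (a + 1) (n - a - 1)).map (fun b => (a, b))).map
        (fun x : Nat × Nat => if x.1 + x.2 == 2 * i - 1 then d x.1 x.2 else 0)).sum
      = if 2 * i - n ≤ a ∧ a < i then d a (2 * i - 1 - a) else 0 := by
    intro a ha
    rw [List.map_map, List.range'_eq_map_range, List.map_map, pvSumMapRange]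
    simp only [Function.comp]
    by_cases hai : a < i
    · have hcong : ∀ k ∈ Finset.range (n - a - 1),
          (if (a + (a + 1 + k) == 2 * i - 1) = true then d a (a + 1 + k) else 0)
          = if k = 2 * i - 2 * a - 2 then d a (a + 1 + k) else 0 := by
        intro k _
        by_cases hk : a + (a + 1 + k) = 2 * i - 1
        · rw [if_pos (by simpa using hk), if_pos (by omega)]
        · rw [if_neg (by simpa using hk), if_neg (by omega)]
      rw [Finset.sum_congr rfl hcong, Finset.sum_ite_eq' (Finset.range (n - a - 1)) (2 * i - 2 * a - 2)]
      by_cases hin : 2 * i - 2 * a - 2 ∈ Finset.range (n - a - 1)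
      · rw [if_pos hin]
        have hin' := Finset.mem_range.mp hin
        rw [if_pos (by omega)]
        congr 1
        omega
      · rw [if_neg hin]
        have hin' : ¬ (2 * i - 2 * a - 2 < n - a - 1) := fun hc => hin (Finset.mem_range.mpr hc)
        rw [if_neg (by omega)]
    · -- a ≥ i: no pair on this diagonal
      have hz : ∀ k ∈ Finset.range (n - a - 1),
          (if (a + (a + 1 + k) == 2 * i - 1) = true then d a (a + 1 + k) else 0) = 0 := by
        intro k _
        rw [if_neg (by simp; omega)]
      rw [Finset.sum_congr rfl hz]
      simp
      omega
  rw [pvSumMapRange]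
  simp only [Function.comp]
  have houter : ∀ a ∈ Finset.range n,
      (((List.range' (a + 1) (n - a - 1)).map (fun b => (a, b))).map
        (fun x : Nat × Nat => if x.1 + x.2 == 2 * i - 1 then d x.1 x.2 else 0)).sum
      = if 2 * i - n ≤ a ∧ a < i then d a (2 * i - 1 - a) else 0 :=
    fun a ha => inner a (Finset.mem_range.mp ha)
  rw [Finset.sum_congr rfl houter, Finset.sum_ite, Finset.sum_const_zero, add_zero]
  have hfilter : (Finset.range n).filter (fun a => 2 * i - n ≤ a ∧ a < i)
      = Finset.Ico (2 * i - n) i := by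
    apply Finset.ext
    intro a
    simp only [Finset.mem_filter, Finset.mem_range, Finset.mem_Ico]
    omega
  rw [hfilter, Finset.sum_Ico_eq_sum_range]
  unfold pvMirror
  have hm : i - (2 * i - n) = min i (n - i) := by omega
  rw [hm, ← Finset.sum_range_reflect]
  apply Finset.sum_congr rfl
  intro k hk
  have hk' := Finset.mem_range.mp hk
  congr 1 <;> omega

-- ---- the two search loops ----

theorem pvLoops_eq (numbers : List Nat) (smudges : Int) (bk : List Nat) (n : Nat)
    (h : ∀ i, 1 ≤ i → i < n → pvDistA numbers i = bk.getD (2 * i - 1) 0) :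
    ∀ ks : List Nat, (∀ k ∈ ks, 1 ≤ k + 1 ∧ k + 1 < n) →
      pvFmGoA numbers smudges (ks.map (fun k : Nat => (1 : Int) + (k : Int)))
        = pvScanB bk smudges (ks.map (fun k => 1 + k))
  | [], _ => rfl
  | k :: ks, hks => by
      have hk := hks k (List.mem_cons_self ..)
      simp only [List.map_cons, pvFmGoA, pvScanB]
      have htn : ((1 : Int) + (k : Int)).toNat = 1 + k := by omega
      rw [htn, h (1 + k) (by omega) (by omega)]
      split
      · push_cast; ring
      · exact pvLoops_eq numbers smudges bk n h ks
          (fun x hx => hks x (List.mem_cons_of_mem _ hx))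

-- generic per-direction equality: A's find_mirror = B's bucket scan
theorem pvFind_eq_scan (p : List String) (smudges : Int) (hgood : pvGoodPat p)
    (d : Nat → Nat → Nat)
    (hd : ∀ a b : Nat, a < p.length → b < p.length →
      pvRowDistB (p.getD a "") (p.getD b "") = d a b) :
    (pvFindMirrorA p smudges).getD 0
      = pvScanB (pvBuckB p.length d) smudges (List.range' 1 (p.length - 1)) := by
  unfold pvFindMirrorA
  rw [pvNumbers_good p hgood.1]
  simp only [Option.getD_some, List.length_map]
  rw [PySem.List.pyRange_one]
  have h1 : ((p.length : Int) - 1).toNat = p.length - 1 := by omega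
  rw [h1, List.range'_eq_map_range]
  apply pvLoops_eq
  · intro i hi1 hi2
    rw [pvDist_eq p i hi1 hi2 hgood, pvBuck_getD _ _ _ hi1 hi2]
    unfold pvMirror
    apply Finset.sum_congr rfl
    intro k hk
    have hk' := Finset.mem_range.mp hk
    exact hd _ _ (by omega) (by omega)
  · intro k hk
    have := List.mem_range.mp hk
    omega

-- ---- the column direction: B's direct column distances vs A's transpose ----

theorem pvT_length (p : List String) (hne : p ≠ [])
    (hrect : ∀ s ∈ p, s.toList.length = (p.headD "").toList.length) :
    ((pvTransposeZip (p.map String.toList)).map (fun cs => String.ofList cs)).length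
      = (p.headD "").toList.length := by
  have : pvMinLen (p.map String.toList) = (p.headD "").toList.length := by
    apply pvMinLen_const
    · intro r hr
      obtain ⟨s, hs, rfl⟩ := List.mem_map.mp hr
      exact hrect s hs
    · simpa using hne
  simp [pvTransposeZip, this]

-- the a-th transposed row is the a-th column
theorem pvT_getD (p : List String) (a : Nat) (hne : p ≠ [])
    (hrect : ∀ s ∈ p, s.toList.length = (p.headD "").toList.length)
    (ha : a < (p.headD "").toList.length) :
    (((pvTransposeZip (p.map String.toList)).map (fun cs => String.ofList cs)).getD a "").toList
      = p.map (fun s => s.toList.getD a ' ') := by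
  have hml : pvMinLen (p.map String.toList) = (p.headD "").toList.length := by
    apply pvMinLen_const
    · intro r hr
      obtain ⟨s, hs, rfl⟩ := List.mem_map.mp hr
      exact hrect s hs
    · simpa using hne
  have hlen : a < ((pvTransposeZip (p.map String.toList)).map (fun cs => String.ofList cs)).length := by
    unfold pvTransposeZip
    rw [List.length_map, List.length_map, List.length_range, hml]
    exact ha
  rw [List.getD_eq_getElem _ _ hlen]
  simp [pvTransposeZip, List.map_map]

-- row distance of two transposed rows = B's direct column distance
theorem pvColDist_eq (p : List String) (a b : Nat) (hne : p ≠ [])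
    (hrect : ∀ s ∈ p, s.toList.length = (p.headD "").toList.length)
    (ha : a < (p.headD "").toList.length) (hb : b < (p.headD "").toList.length) :
    pvRowDistB
      (((pvTransposeZip (p.map String.toList)).map (fun cs => String.ofList cs)).getD a "")
      (((pvTransposeZip (p.map String.toList)).map (fun cs => String.ofList cs)).getD b "")
      = pvColDistB p a b := by
  unfold pvRowDistB pvColDistB
  rw [pvT_getD p a hne hrect ha, pvT_getD p b hne hrect hb, List.zip_map', List.foldl_map]

-- ===== VERDICT (by name: the statement is the Claim_ definition above) =====
theorem partx_spec : Claim_equal_partx := by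
  intro patterns smudges _hdom hpre
  unfold Spec_partx partx partx_alt
  apply PySem.List.foldl_congr_mem
  intro total p hp
  have hgood := pvGoodPat_of_B p (hpre p hp)
  simp only []
  -- row part
  have hrow : (pvFindMirrorA p smudges).getD 0
      = pvScanB (pvBuckB p.length (fun a b => pvRowDistB (p.getD a "") (p.getD b "")))
          smudges (List.range' 1 (p.length - 1)) :=
    pvFind_eq_scan p smudges hgood _ (fun _ _ _ _ => rfl)
  -- column part
  have hcol : (pvFindMirrorA
        ((pvTransposeZip (p.map String.toList)).map (fun cs => String.ofList cs)) smudges).getD 0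
      = pvScanB (pvBuckB (p.headD "").toList.length (pvColDistB p)) smudges
          (List.range' 1 ((p.headD "").toList.length - 1)) := by
    rcases List.eq_nil_or_concat p with rfl | hne'
    · -- empty pattern: transpose is empty, width is 0; both sides are 0
      simp [pvTransposeZip, pvMinLen, pvFindMirrorA, pvNumbers?, pvFmGoA,
        PySem.List.pyRange_one, pvScanB]
    · have hne : p ≠ [] := by rcases hne' with ⟨l, x, rfl⟩; simp
      have hrect := hgood.2.1
      have ht := pvT_length p hne hrect
      have := pvFind_eq_scan
        ((pvTransposeZip (p.map String.toList)).map (fun cs => String.ofList cs)) smudges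
        (pvTranspose_good p hgood) (pvColDistB p) ?_
      · rw [this, ht]
      · intro a b ha hb
        rw [ht] at ha hb
        exact pvColDist_eq p a b hne hrect ha hb
  rw [hrow, hcol]
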